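-- pv_equiv track=rewrite | github.com/naveen07coder/Regular-Expression | 1.py | findMod
-- ===== SOURCE A (Python) =====
-- def findMod(a,n,m):
--   mf=10**len(str(a))%m
--   ans = 0
--   while n:
--     if n%2==1:
--         ans=((ans*mf)%m+a)%m
--     a = ((a*mf)%m+a)%m
--     mf = pow(mf,2,m)
--     n = n//2
--   return ans
-- ===== SOURCE B (Python) =====
-- def findMod(a, n, m):
--     # Closed-form geometric sum: a repeated n times is a * (mf^n - 1)/(mf - 1) mod m,
--     # computed exactly with one pow under the lifted modulus m*(mf-1).
--     mf = 10 ** len(str(a)) % m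
--     if mf == 1:
--         return a * n % m
--     t = pow(mf, n, m * (mf - 1))
--     return a * ((t - 1) // (mf - 1)) % m
-- ===== Notes on version B (the rewrite author's own statement) =====
-- stated objective: alternative
-- what changed: Replaces the binary-doubling bit loop (squaring the shift factor, conditionally accumulating per bit) with a closed-form geometric sum: one pow of mf under the lifted modulus m*(mf-1) followed by an exact division by mf-1 (special-casing mf == 1 as a*n).
import Mathlib
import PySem

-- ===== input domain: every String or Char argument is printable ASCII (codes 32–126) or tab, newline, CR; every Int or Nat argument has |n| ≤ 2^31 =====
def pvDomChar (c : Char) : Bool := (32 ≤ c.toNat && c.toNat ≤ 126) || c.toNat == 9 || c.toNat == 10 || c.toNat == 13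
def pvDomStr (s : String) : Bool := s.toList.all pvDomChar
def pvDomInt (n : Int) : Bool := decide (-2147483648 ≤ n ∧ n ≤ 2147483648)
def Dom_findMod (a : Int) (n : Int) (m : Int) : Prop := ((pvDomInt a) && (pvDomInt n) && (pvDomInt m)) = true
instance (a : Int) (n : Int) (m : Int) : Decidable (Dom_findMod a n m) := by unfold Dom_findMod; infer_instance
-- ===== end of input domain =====

-- B replaces A's binary-doubling bit loop with a closed-form geometric sum (pow under the
-- lifted modulus m*(mf-1) plus an exact division); objective: alternative algorithm.

-- ===== PORT A =====
-- Python's `while n:` loop; for n < 0 the Python diverges (n //= 2 never reaches 0),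
-- so the guard is written `0 < n`, which agrees with `n ≠ 0` on all n ≥ 0 (Pre_ requires 0 ≤ n).
def findModLoop (m ans a mf n : Int) : Int :=
  if 0 < n then
    findModLoop m
      (if PySem.Int.mod n 2 = 1 then PySem.Int.mod (PySem.Int.mod (ans * mf) m + a) m else ans)
      (PySem.Int.mod (PySem.Int.mod (a * mf) m + a) m)
      (PySem.Int.powMod mf 2 m)
      (PySem.Int.floordiv n 2)
  else ans
termination_by n.toNat
decreasing_by
  rw [PySem.Int.floordiv_eq_ediv_of_pos (by omega : (0:Int) < 2)]
  omega

-- 10**len(str(a)) : the string length is nonnegative, so .toNat is exact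
def findMod (a : Int) (n : Int) (m : Int) : Int :=
  let mf := PySem.Int.mod ((10:Int) ^ (PySem.Str.len (PySem.Int.toStr a)).toNat) m
  findModLoop m 0 a mf n

-- ===== PORT B =====
-- hand port of Python's built-in three-argument pow (binary exponentiation on the
-- exponent's bits with fmod-reduced state); proved equal to PySem.Int.powMod below
def pmAux (M : Int) (e : Nat) (base acc : Int) : Int :=
  if e = 0 then acc
  else
    pmAux M (e / 2) (PySem.Int.mod (base * base) M)
      (if e % 2 = 1 then PySem.Int.mod (acc * base) M else acc)
termination_by e
decreasing_by omega

def powModFast (b : Int) (e : Nat) (M : Int) : Int :=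
  pmAux M e (PySem.Int.mod b M) (PySem.Int.mod 1 M)

-- pow(mf, n, M) needs n ≥ 0 (Pre_ guarantees it), so the exponent is n.toNat
def findMod_alt (a : Int) (n : Int) (m : Int) : Int :=
  let mf := PySem.Int.mod ((10:Int) ^ (PySem.Str.len (PySem.Int.toStr a)).toNat) m
  if mf = 1 then
    PySem.Int.mod (a * n) m
  else
    let t := powModFast mf n.toNat (m * (mf - 1))
    PySem.Int.mod (a * PySem.Int.floordiv (t - 1) (mf - 1)) m

-- ===== PRECONDITION & SPEC =====
-- m = 0 makes Python's A raise ZeroDivisionError; n < 0 makes A loop forever (never returns).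
def Pre_findMod (a : Int) (n : Int) (m : Int) : Prop := m ≠ 0 ∧ 0 ≤ n
instance (a : Int) (n : Int) (m : Int) : Decidable (Pre_findMod a n m) := by unfold Pre_findMod; infer_instance

def pvWitness_findMod : Int × Int × Int := (1234, 5, 7)

def Spec_findMod (a : Int) (n : Int) (m : Int) (out : Int) : Prop := out = findMod_alt a n m
instance (a : Int) (n : Int) (m : Int) (out : Int) : Decidable (Spec_findMod a n m out) := by unfold Spec_findMod; infer_instance

-- ===== CLAIM (what is proved, stated in full; the proofs are below) =====
def Claim_equal_findMod : Prop := ∀ (a : Int) (n : Int) (m : Int), Dom_findMod a n m → Pre_findMod a n m → Spec_findMod a n m (findMod a n m)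

-- ===== LEMMAS AND PROOFS =====

-- geometric sum 1 + x + … + x^(k-1)
def geomS (x : Int) : Nat → Int
  | 0 => 0
  | k + 1 => geomS x k + x ^ k

-- Python's % (fmod) reduces to a residue congruent mod m
lemma pv_mod_modEq (x m : Int) : Int.ModEq m (PySem.Int.mod x m) x := by
  rw [Int.modEq_iff_dvd]
  exact ⟨PySem.Int.floordiv x m, by
    have h := PySem.Int.floordiv_mul_add_mod x m
    linarith [h]⟩

lemma pv_mod_eq_of_modEq {m x y : Int} (hm : m ≠ 0) (h : Int.ModEq m x y) :
    PySem.Int.mod x m = PySem.Int.mod y m := by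
  have hd : m ∣ PySem.Int.mod y m - PySem.Int.mod x m :=
    (((pv_mod_modEq x m).trans h).trans (pv_mod_modEq y m).symm).dvd
  have hd' : |m| ∣ PySem.Int.mod y m - PySem.Int.mod x m := (abs_dvd _ _).mpr hd
  rcases lt_trichotomy m 0 with hneg | h0 | hpos
  · obtain ⟨b1a, b1b⟩ := PySem.Int.mod_neg_bounds (a := x) hneg
    obtain ⟨b2a, b2b⟩ := PySem.Int.mod_neg_bounds (a := y) hneg
    have habs : |m| = -m := abs_of_neg hneg
    have h3 : |PySem.Int.mod y m - PySem.Int.mod x m| < |m| := by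
      rw [abs_lt, habs]; constructor <;> omega
    have := Int.eq_zero_of_abs_lt_dvd hd' h3
    omega
  · exact absurd h0 hm
  · have b1n := PySem.Int.mod_nonneg (a := x) hpos
    have b1l := PySem.Int.mod_lt (a := x) hpos
    have b2n := PySem.Int.mod_nonneg (a := y) hpos
    have b2l := PySem.Int.mod_lt (a := y) hpos
    have habs : |m| = m := abs_of_pos hpos
    have h3 : |PySem.Int.mod y m - PySem.Int.mod x m| < |m| := by
      rw [abs_lt, habs]; constructor <;> omega
    have := Int.eq_zero_of_abs_lt_dvd hd' h3
    omega

lemma geomS_modEq {m x y : Int} (h : Int.ModEq m x y) (k : Nat) :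
    Int.ModEq m (geomS x k) (geomS y k) := by
  induction k with
  | zero => rfl
  | succ k ih => exact Int.ModEq.add ih (h.pow k)

-- (x+1) * (1 + x² + … + x^(2k-2)) = 1 + x + … + x^(2k-1)
lemma geomS_sq (x : Int) (k : Nat) : (x + 1) * geomS (x ^ 2) k = geomS x (2 * k) := by
  induction k with
  | zero => simp [geomS]
  | succ k ih =>
    have h2 : 2 * (k + 1) = (2 * k + 1) + 1 := by ring
    rw [h2]
    simp only [geomS]
    rw [← ih]
    ring_nf

lemma geomS_odd (x : Int) (k : Nat) : geomS x (2 * k + 1) = geomS x (2 * k) + x ^ (2 * k) := rfl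

-- 1 + 1 + … (k terms)
lemma geomS_one (k : Nat) : geomS 1 k = (k : Int) := by
  induction k with
  | zero => rfl
  | succ k ih => simp [geomS, ih]

-- (x-1) * (1 + x + … + x^(k-1)) = x^k - 1
lemma geomS_mul_sub_one (x : Int) (k : Nat) : (x - 1) * geomS x k = x ^ k - 1 := by
  induction k with
  | zero => simp [geomS]
  | succ k ih => simp only [geomS, pow_succ]; linear_combination ih

lemma pmAux_inv (M : Int) (hM : M ≠ 0) :
    ∀ (e : Nat) (x y : Int),
      pmAux M e (PySem.Int.mod y M) (PySem.Int.mod x M) = PySem.Int.mod (x * y ^ e) M := by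
  intro e
  induction e using Nat.strong_induction_on with
  | _ e ih =>
    intro x y
    rw [pmAux]
    by_cases h0 : e = 0
    · rw [if_pos h0, h0]
      simp
    · rw [if_neg h0]
      have hrec : e / 2 < e := by omega
      have hsq : PySem.Int.mod (PySem.Int.mod y M * PySem.Int.mod y M) M
          = PySem.Int.mod (y * y) M :=
        pv_mod_eq_of_modEq hM ((pv_mod_modEq y M).mul (pv_mod_modEq y M))
      have hodd : PySem.Int.mod (PySem.Int.mod x M * PySem.Int.mod y M) M
          = PySem.Int.mod (x * y) M :=
        pv_mod_eq_of_modEq hM ((pv_mod_modEq x M).mul (pv_mod_modEq y M))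
      by_cases hp : e % 2 = 1
      · rw [if_pos hp, hsq, hodd, ih _ hrec (x * y) (y * y)]
        apply pv_mod_eq_of_modEq hM
        have he : e = 2 * (e / 2) + 1 := by omega
        have hid : x * y * (y * y) ^ (e / 2) = x * y ^ (2 * (e / 2) + 1) := by
          rw [show y * y = y ^ 2 by ring, ← pow_mul, pow_succ]
          ring
        rw [hid, ← he]
      · rw [if_neg hp, hsq, ih _ hrec x (y * y)]
        apply pv_mod_eq_of_modEq hM
        have he : e = 2 * (e / 2) := by omega
        have hid : x * (y * y) ^ (e / 2) = x * y ^ (2 * (e / 2)) := by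
          rw [show y * y = y ^ 2 by ring, ← pow_mul]
        rw [hid, ← he]

lemma powModFast_eq (b : Int) (e : Nat) (M : Int) (hM : M ≠ 0) :
    powModFast b e M = PySem.Int.powMod b e M := by
  unfold powModFast PySem.Int.powMod
  rw [pmAux_inv M hM e 1 b, one_mul]

-- the exact-division quotient of B is the geometric sum mod m
lemma alt_quot (m mf : Int) (hm : m ≠ 0) (hmf : mf ≠ 1) (k : Nat) :
    Int.ModEq m
      (PySem.Int.floordiv (powModFast mf k (m * (mf - 1)) - 1) (mf - 1))
      (geomS mf k) := by
  have hM : m * (mf - 1) ≠ 0 := mul_ne_zero hm (by omega)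
  rw [powModFast_eq _ _ _ hM]
  have hq := PySem.Int.floordiv_mul_add_mod (mf ^ k) (m * (mf - 1))
  have h2 := geomS_mul_sub_one mf k
  have key : PySem.Int.powMod mf k (m * (mf - 1)) - 1
      = (mf - 1) * (geomS mf k - PySem.Int.floordiv (mf ^ k) (m * (mf - 1)) * m) := by
    unfold PySem.Int.powMod
    linear_combination hq - h2
  have hne : mf - 1 ≠ 0 := by omega
  rw [key]
  show Int.fdiv _ _ ≡ _ [ZMOD m]
  rw [Int.mul_fdiv_cancel_left _ hne]
  exact Int.modEq_iff_dvd.mpr ⟨PySem.Int.floordiv (mf ^ k) (m * (mf - 1)), by ring⟩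

-- invariant of A's binary-doubling loop
lemma loopA_inv (m : Int) (hm : m ≠ 0) :
    ∀ (K : Nat) (n ans a mf : Int), n.toNat = K → 1 ≤ n →
      findModLoop m ans a mf n
        = PySem.Int.mod (ans * mf ^ K + a * geomS mf K) m := by
  intro K
  induction K using Nat.strong_induction_on with
  | _ K ih =>
    intro n ans a mf hK hn
    rw [findModLoop]
    rw [if_pos (by omega)]
    have hfd : PySem.Int.floordiv n 2 = n / 2 :=
      PySem.Int.floordiv_eq_ediv_of_pos (by omega)
    have hmod2 : PySem.Int.mod n 2 = n % 2 := PySem.Int.mod_eq_emod_of_pos (by omega)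
    by_cases h1 : n = 1
    · subst h1
      rw [findModLoop]
      rw [hfd]
      norm_num
      have hK1 : K = 1 := by omega
      subst hK1
      apply pv_mod_eq_of_modEq hm
      have hc : Int.ModEq m (PySem.Int.mod (ans * mf) m) (ans * mf) := pv_mod_modEq _ m
      calc PySem.Int.mod (ans * mf) m + a ≡ ans * mf + a [ZMOD m] := hc.add_right a
        _ = ans * mf ^ 1 + a * geomS mf 1 := by simp [geomS]
    · -- n ≥ 2
      have hn2 : 2 ≤ n := by omega
      have hrec : 1 ≤ PySem.Int.floordiv n 2 := by rw [hfd]; omega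
      have hKr : (PySem.Int.floordiv n 2).toNat < K := by rw [hfd]; omega
      rw [ih _ hKr _ _ _ _ rfl hrec]
      apply pv_mod_eq_of_modEq hm
      set k' : Nat := (PySem.Int.floordiv n 2).toNat with hk'
      have hmfc : Int.ModEq m (PySem.Int.powMod mf 2 m) (mf ^ 2) := by
        unfold PySem.Int.powMod; exact pv_mod_modEq _ m
      have hac : Int.ModEq m (PySem.Int.mod (PySem.Int.mod (a * mf) m + a) m) (a * mf + a) :=
        (pv_mod_modEq _ m).trans ((pv_mod_modEq (a * mf) m).add_right a)
      -- reduce the recursive state to the unreduced polynomials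
      have step1 :
          Int.ModEq m
            ((if PySem.Int.mod n 2 = 1 then PySem.Int.mod (PySem.Int.mod (ans * mf) m + a) m else ans)
              * (PySem.Int.powMod mf 2 m) ^ k'
              + (PySem.Int.mod (PySem.Int.mod (a * mf) m + a) m)
              * geomS (PySem.Int.powMod mf 2 m) k')
            ((if PySem.Int.mod n 2 = 1 then ans * mf + a else ans) * (mf ^ 2) ^ k'
              + (a * mf + a) * geomS (mf ^ 2) k') := by
        apply Int.ModEq.add
        · apply Int.ModEq.mul
          · split
            · exact (pv_mod_modEq _ m).trans ((pv_mod_modEq (ans * mf) m).add_right a)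
            · exact Int.ModEq.refl _
          · exact hmfc.pow k'
        · exact Int.ModEq.mul hac (geomS_modEq hmfc k')
      refine step1.trans ?_
      -- now a pure ring/geomS identity, split on parity of n
      have hid : a * mf + a = a * (mf + 1) := by ring
      by_cases hpar : n % 2 = 1
      · -- n odd: K = 2k' + 1
        have hKsplit : K = 2 * k' + 1 := by
          rw [hk', hfd]; omega
        rw [hmod2, if_pos hpar, hKsplit]
        have : (ans * mf + a) * (mf ^ 2) ^ k' + (a * mf + a) * geomS (mf ^ 2) k'
            = ans * mf ^ (2 * k' + 1) + a * geomS mf (2 * k' + 1) := by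
          rw [geomS_odd, hid, mul_assoc a (mf + 1), geomS_sq, ← pow_mul]
          ring
        rw [this]
      · -- n even: K = 2k'
        have hpar0 : n % 2 = 0 := by omega
        have hKsplit : K = 2 * k' := by
          rw [hk', hfd]; omega
        rw [hmod2, if_neg (by omega), hKsplit]
        have : ans * (mf ^ 2) ^ k' + (a * mf + a) * geomS (mf ^ 2) k'
            = ans * mf ^ (2 * k') + a * geomS mf (2 * k') := by
          rw [hid, mul_assoc a (mf + 1), geomS_sq, ← pow_mul]
        rw [this]

-- ===== VERDICT (by name: the statement is the Claim_ definition above) =====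
theorem findMod_spec : Claim_equal_findMod := by
  intro a n m _ hpre
  obtain ⟨hm, hn⟩ := hpre
  unfold Spec_findMod findMod findMod_alt
  set mf := PySem.Int.mod ((10:Int) ^ (PySem.Str.len (PySem.Int.toStr a)).toNat) m with hmf
  -- B equals mod (a * geomS mf n.toNat) m
  have hB : (if mf = 1 then PySem.Int.mod (a * n) m
      else PySem.Int.mod (a * PySem.Int.floordiv
        (powModFast mf n.toNat (m * (mf - 1)) - 1) (mf - 1)) m)
      = PySem.Int.mod (a * geomS mf n.toNat) m := by
    by_cases h1 : mf = 1
    · rw [if_pos h1, h1, geomS_one]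
      congr 1
      congr 1
      omega
    · rw [if_neg h1]
      exact pv_mod_eq_of_modEq hm ((alt_quot m mf hm h1 n.toNat).mul_left a)
  rw [hB]
  by_cases h0 : n = 0
  · subst h0
    rw [findModLoop]
    norm_num [geomS, PySem.Int.mod, Int.zero_fmod]
  · have h1 : 1 ≤ n := by omega
    rw [loopA_inv m hm n.toNat n 0 a mf rfl h1]
    congr 1
    ring
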